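-- pv_equiv track=rewrite | github.com/MortezaGhoddousi/Python-courses | Python 26/Session 15/functions.py | golLength
-- ===== SOURCE A (Python) =====
-- def golLength(cards):
--     dell = 0
--     gishniz = 0
--     khesht = 0
--     pik = 0
--
--     delCards = []
--     gishnizCards = []
--     kheshtCards = []
--     pikCards = []
--
--     for card in cards:
--         gol = card.split(' ')[1]
--         if gol == 'del':
--             delCards.append(card)
--         elif gol == 'gishniz':
--             gishnizCards.append(card)
--         elif gol == 'khesht':
--             kheshtCards.append(card)
--         elif gol == 'pik':
--             pikCards.append(card)
--
--     return [delCards, gishnizCards, kheshtCards, pikCards]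
-- ===== SOURCE B (Python) =====
-- def golLength(cards):
--     suits = ['del', 'gishniz', 'khesht', 'pik']
--     return [[card for card in cards if card.split(' ')[1] == s] for s in suits]
-- ===== Notes on version B (the rewrite author's own statement) =====
-- stated objective: idiomatic
-- what changed: Replaces the single pass with a mutable four-way branch accumulator by four independent filtering comprehensions, one full scan per suit, returned in the fixed suit order.
import Mathlib
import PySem

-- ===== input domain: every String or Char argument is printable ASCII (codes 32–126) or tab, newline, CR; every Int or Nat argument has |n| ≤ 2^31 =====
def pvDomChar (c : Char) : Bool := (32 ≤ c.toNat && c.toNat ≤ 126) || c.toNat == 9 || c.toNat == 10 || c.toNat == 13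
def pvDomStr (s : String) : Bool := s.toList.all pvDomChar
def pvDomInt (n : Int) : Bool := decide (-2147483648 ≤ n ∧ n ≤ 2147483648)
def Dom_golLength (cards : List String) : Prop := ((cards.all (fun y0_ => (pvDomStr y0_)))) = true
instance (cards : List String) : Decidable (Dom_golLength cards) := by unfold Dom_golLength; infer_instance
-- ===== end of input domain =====

-- B buckets by four independent filtering scans (one per suit) instead of A's single pass
-- with four mutable accumulators; same return value (objective: idiomatic), no speed claim.

-- ===== PORT A =====
-- card.split(' ')[1]; the [1] index raises IndexError when absent — Pre_ excludes that,
-- so the .getD "" default is never reached on admitted inputs.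
def pvGolA (card : String) : String :=
  (PySem.List.pyGet? ((PySem.Str.split? card " ").getD []) 1).getD ""

def golLength (cards : List String) : List (List String) :=
  let st := cards.foldl
    (fun (st : List String × List String × List String × List String) card =>
      let gol := pvGolA card
      if gol = "del" then (st.1 ++ [card], st.2.1, st.2.2.1, st.2.2.2)
      else if gol = "gishniz" then (st.1, st.2.1 ++ [card], st.2.2.1, st.2.2.2)
      else if gol = "khesht" then (st.1, st.2.1, st.2.2.1 ++ [card], st.2.2.2)
      else if gol = "pik" then (st.1, st.2.1, st.2.2.1, st.2.2.2 ++ [card])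
      else st)
    ([], [], [], [])
  [st.1, st.2.1, st.2.2.1, st.2.2.2]

-- ===== PORT B =====
def pvGolB (card : String) : String :=
  (PySem.List.pyGet? ((PySem.Str.split? card " ").getD []) 1).getD ""

def golLength_alt (cards : List String) : List (List String) :=
  ["del", "gishniz", "khesht", "pik"].map
    (fun s => cards.filter (fun card => pvGolB card = s))

-- ===== PRECONDITION & SPEC =====
-- Pre_: every card splits on ' ' into at least two pieces; otherwise card.split(' ')[1]
-- raises IndexError in both Pythons.
def Pre_golLength (cards : List String) : Prop :=
  (cards.all (fun c => 2 ≤ ((PySem.Str.split? c " ").getD []).length)) = true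
instance (cards : List String) : Decidable (Pre_golLength cards) := by
  unfold Pre_golLength; infer_instance

def pvWitness_golLength : List String := ["2 del", "3 pik", "ace gishniz"]

def Spec_golLength (cards : List String) (out : List (List String)) : Prop := out = golLength_alt cards
instance (cards : List String) (out : List (List String)) : Decidable (Spec_golLength cards out) := by unfold Spec_golLength; infer_instance

-- ===== CLAIM (what is proved, stated in full; the proofs are below) =====
def Claim_equal_golLength : Prop := ∀ (cards : List String), Dom_golLength cards → Pre_golLength cards → Spec_golLength cards (golLength cards)

-- ===== LEMMAS AND PROOFS =====

theorem pvFold_characterize (cards : List String)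
    (d g k p : List String) :
    cards.foldl
      (fun (st : List String × List String × List String × List String) card =>
        let gol := pvGolA card
        if gol = "del" then (st.1 ++ [card], st.2.1, st.2.2.1, st.2.2.2)
        else if gol = "gishniz" then (st.1, st.2.1 ++ [card], st.2.2.1, st.2.2.2)
        else if gol = "khesht" then (st.1, st.2.1, st.2.2.1 ++ [card], st.2.2.2)
        else if gol = "pik" then (st.1, st.2.1, st.2.2.1, st.2.2.2 ++ [card])
        else st)
      (d, g, k, p)
    = (d ++ cards.filter (fun c => pvGolB c = "del"),
       g ++ cards.filter (fun c => pvGolB c = "gishniz"),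
       k ++ cards.filter (fun c => pvGolB c = "khesht"),
       p ++ cards.filter (fun c => pvGolB c = "pik")) := by
  induction cards generalizing d g k p with
  | nil => simp
  | cons c cs ih =>
    have hgol : pvGolB c = pvGolA c := rfl
    simp only [List.foldl_cons, List.filter_cons, hgol]
    by_cases h1 : pvGolA c = "del"
    · simp [h1, ih]
    · by_cases h2 : pvGolA c = "gishniz"
      · simp [h1, h2, ih]
      · by_cases h3 : pvGolA c = "khesht"
        · simp [h1, h2, h3, ih]
        · by_cases h4 : pvGolA c = "pik"
          · simp [h1, h4, ih]
          · simp [h1, h2, h3, h4, ih]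

-- ===== VERDICT (by name: the statement is the Claim_ definition above) =====
theorem golLength_spec : Claim_equal_golLength := by
  intro cards _ _
  unfold Spec_golLength golLength golLength_alt
  simp only [pvFold_characterize, List.map, List.nil_append]
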